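-- pv_equiv track=rewrite | github.com/AshishSalaskar1/DS_Algo_Playground | Track/DSA_A_to_Z/Sweep_Lines/Cut_grids_in_3_sections.py | check_cuts
-- ===== SOURCE A (Python) =====
-- def check_cuts(events):
--     cur_rectangles, cuts_left = 0, 3
--     for time, incr in events:
--         cur_rectangles += incr
--
--         if incr == -1 and cur_rectangles == 0:
--             cuts_left -= 1
--
--         if cuts_left == 0:
--             return True
--
--     return False
-- ===== SOURCE B (Python) =====
-- def check_cuts(events):
--     # Pass 1: build the table of running totals of incr.
--     totals = []
--     running = 0
--     for _, incr in events:
--         running += incr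
--         totals.append(running)
--     # Pass 2: count events that close a section at ground level.
--     count = 0
--     for (_, incr), total in zip(events, totals):
--         if incr == -1 and total == 0:
--             count += 1
--     return count >= 3
-- ===== Notes on version B (the rewrite author's own statement) =====
-- stated objective: alternative
-- what changed: Replaced A's fused accumulate-and-countdown loop with early return by two separate passes: first build the full prefix-sum table of incr, then count over the zipped table how many events have incr==-1 and prefix total 0, returning count >= 3.
import Mathlib
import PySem

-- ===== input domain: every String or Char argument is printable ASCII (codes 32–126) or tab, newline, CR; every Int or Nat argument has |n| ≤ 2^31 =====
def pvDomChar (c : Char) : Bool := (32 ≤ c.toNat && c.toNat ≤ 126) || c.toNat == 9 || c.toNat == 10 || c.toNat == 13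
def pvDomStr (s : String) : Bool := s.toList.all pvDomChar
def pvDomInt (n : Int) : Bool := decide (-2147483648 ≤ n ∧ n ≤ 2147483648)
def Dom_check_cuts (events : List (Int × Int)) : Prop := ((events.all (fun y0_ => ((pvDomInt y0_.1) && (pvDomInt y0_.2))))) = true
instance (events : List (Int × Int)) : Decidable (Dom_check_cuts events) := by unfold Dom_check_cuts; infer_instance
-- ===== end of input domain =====

-- B replaces A's fused loop with an early return by a prefix-sum table pass then a counting pass; alternative decomposition, same result.

-- ===== PORT A =====
def check_cuts_go : List (Int × Int) → Int → Int → Bool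
  | [], _, _ => false
  | (_, incr) :: rest, cur, cuts =>
    let cur' := cur + incr
    let cuts' := if incr = -1 ∧ cur' = 0 then cuts - 1 else cuts
    if cuts' = 0 then true else check_cuts_go rest cur' cuts'

def check_cuts (events : List (Int × Int)) : Bool :=
  check_cuts_go events 0 3

-- ===== PORT B =====
-- pass 1: running totals table
def prefixTotals : List (Int × Int) → Int → List Int
  | [], _ => []
  | (_, incr) :: rest, running => (running + incr) :: prefixTotals rest (running + incr)

-- pass 2: count over the zipped table
def countClosers : List ((Int × Int) × Int) → Int
  | [] => 0
  | ((_, incr), total) :: rest =>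
    countClosers rest + (if incr = -1 ∧ total = 0 then 1 else 0)

def check_cuts_alt (events : List (Int × Int)) : Bool :=
  decide (countClosers (events.zip (prefixTotals events 0)) ≥ 3)

-- ===== PRECONDITION & SPEC =====
def Spec_check_cuts (events : List (Int × Int)) (out : Bool) : Prop := out = check_cuts_alt events
instance (events : List (Int × Int)) (out : Bool) : Decidable (Spec_check_cuts events out) := by unfold Spec_check_cuts; infer_instance

-- ===== CLAIM (what is proved, stated in full; the proofs are below) =====
def Claim_equal_check_cuts : Prop := ∀ (events : List (Int × Int)), Dom_check_cuts events → Spec_check_cuts events (check_cuts events)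

-- ===== LEMMAS AND PROOFS =====
theorem countClosers_nonneg (l : List ((Int × Int) × Int)) : 0 ≤ countClosers l := by
  induction l with
  | nil => simp [countClosers]
  | cons h t ih =>
    obtain ⟨⟨_, incr⟩, total⟩ := h
    simp only [countClosers]
    split <;> omega

theorem go_eq (events : List (Int × Int)) : ∀ (cur cuts : Int), 1 ≤ cuts →
    check_cuts_go events cur cuts =
      decide (countClosers (events.zip (prefixTotals events cur)) ≥ cuts) := by
  induction events with
  | nil =>
    intro cur cuts hc
    simp [check_cuts_go, prefixTotals, countClosers]
    omega
  | cons h t ih =>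
    intro cur cuts hc
    obtain ⟨time, incr⟩ := h
    simp only [check_cuts_go, prefixTotals, List.zip_cons_cons, countClosers]
    by_cases hm : incr = -1 ∧ cur + incr = 0
    · simp only [if_pos hm]
      by_cases h0 : cuts - 1 = 0
      · simp only [if_pos h0]
        have := countClosers_nonneg (t.zip (prefixTotals t (cur + incr)))
        exact (decide_eq_true (by omega)).symm
      · simp only [if_neg h0]
        rw [ih (cur + incr) (cuts - 1) (by omega)]
        exact decide_eq_decide.mpr ⟨fun h => by omega, fun h => by omega⟩
    · simp only [if_neg hm, if_neg (by omega : ¬ cuts = 0)]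
      rw [ih (cur + incr) cuts hc]
      exact decide_eq_decide.mpr ⟨fun h => by omega, fun h => by omega⟩

-- ===== VERDICT (by name: the statement is the Claim_ definition above) =====
theorem check_cuts_spec : Claim_equal_check_cuts := by
  intro events _
  unfold Spec_check_cuts check_cuts check_cuts_alt
  exact go_eq events 0 3 (by omega)
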